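-- pv_equiv track=rewrite | github.com/duyhunghd6/mas | tools/browse_knowledge.py | find_target_tab
-- ===== SOURCE A (Python) =====
-- def find_target_tab(tabs, url=None):
--     """Find the best tab to use — matching URL or first page tab."""
--     # First, try to find an exact URL match
--     if url:
--         for tab in tabs:
--             tab_url = tab.get("url", "")
--             if url.split("?")[0] in tab_url:
--                 return tab
--
--     # Fallback: first tab with type "page"
--     for tab in tabs:
--         if tab.get("type") == "page":
--             return tab
--
--     # Last resort: first tab
--     return tabs[0] if tabs else None
-- ===== SOURCE B (Python) =====
-- def find_target_tab(tabs, url=None):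
--     """Find the best tab to use - matching URL or first page tab.
--
--     Total fold over the tab list with a pair accumulator (first URL hit,
--     first page tab); the answer is chosen from the pair afterwards."""
--     key = url.split("?")[0] if url else None
--
--     def step(acc, tab):
--         hit, page = acc
--         if hit is None and key is not None and key in tab.get("url", ""):
--             hit = tab
--         if page is None and tab.get("type") == "page":
--             page = tab
--         return (hit, page)
--
--     hit, page = (None, None)
--     for tab in tabs:
--         hit, page = step((hit, page), tab)
--
--     if hit is not None:
--         return hit
--     if page is not None:
--         return page
--     return tabs[0] if tabs else None
-- ===== Notes on version B (the rewrite author's own statement) =====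
-- stated objective: alternative
-- what changed: A's two early-returning sequential scans (each rebuilding a dict view per tab) are replaced by one total fold over the list with a pair accumulator (first URL hit, first page tab), selecting the result from the pair after the fold.
import Mathlib
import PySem

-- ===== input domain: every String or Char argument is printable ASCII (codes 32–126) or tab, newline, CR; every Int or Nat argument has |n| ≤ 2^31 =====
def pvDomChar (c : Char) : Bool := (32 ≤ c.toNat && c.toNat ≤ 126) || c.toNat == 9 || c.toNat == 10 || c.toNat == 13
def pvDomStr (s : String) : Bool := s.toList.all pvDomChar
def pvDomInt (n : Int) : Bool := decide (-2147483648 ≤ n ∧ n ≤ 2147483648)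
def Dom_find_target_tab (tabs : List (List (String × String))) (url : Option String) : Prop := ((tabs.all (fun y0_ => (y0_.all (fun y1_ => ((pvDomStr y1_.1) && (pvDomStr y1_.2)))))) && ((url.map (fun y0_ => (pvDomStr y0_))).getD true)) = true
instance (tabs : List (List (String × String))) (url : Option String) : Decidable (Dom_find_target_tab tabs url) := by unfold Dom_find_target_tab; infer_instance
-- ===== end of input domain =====

-- B replaces A's two early-returning scans by one total fold with a pair accumulator (alternative decomposition, same cost).


-- ===== PORT A =====
-- A's first loop: return the first tab whose "url" value contains key
def pvA_urlLoop (key : String) : List (List (String × String)) → Option (List (String × String))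
  | [] => none
  | tab :: rest =>
    if PySem.Str.isIn key ((PySem.Dict.mk tab).getD "url" "") then some tab
    else pvA_urlLoop key rest

-- A's second loop: return the first tab with type == "page"
def pvA_pageLoop : List (List (String × String)) → Option (List (String × String))
  | [] => none
  | tab :: rest =>
    if (PySem.Dict.mk tab).get? "type" == some "page" then some tab
    else pvA_pageLoop rest

def find_target_tab (tabs : List (List (String × String))) (url : Option String) : Option (List (String × String)) :=
  match (match url with
         | none => none
         | some u =>
           if u = "" then none
           else pvA_urlLoop (((PySem.Str.split? u "?").getD [u]).headD "") tabs : Option (List (String × String))) with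
  | some t => some t
  | none =>
    match pvA_pageLoop tabs with
    | some t => some t
    | none => tabs.head?

-- ===== PORT B =====
-- key = url.split("?")[0] if url else None
def pvB_key (url : Option String) : Option String :=
  match url with
  | none => none
  | some u => if u = "" then none else some (((PySem.Str.split? u "?").getD [u]).headD "")

-- one fold step over the pair accumulator (first URL hit, first page tab)
def pvB_step (key : Option String)
    (acc : Option (List (String × String)) × Option (List (String × String)))
    (tab : List (String × String)) :
    Option (List (String × String)) × Option (List (String × String)) :=
  let hit := if acc.1.isNone &&
      (match key with
       | some k => PySem.Str.isIn k ((PySem.Dict.mk tab).getD "url" "")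
       | none => false) then some tab else acc.1
  let page := if acc.2.isNone && ((PySem.Dict.mk tab).get? "type" == some "page")
    then some tab else acc.2
  (hit, page)

def find_target_tab_alt (tabs : List (List (String × String))) (url : Option String) : Option (List (String × String)) :=
  let r := tabs.foldl (pvB_step (pvB_key url)) (none, none)
  match r.1 with
  | some t => some t
  | none =>
    match r.2 with
    | some t => some t
    | none => tabs.head?

-- ===== PRECONDITION & SPEC =====
def Spec_find_target_tab (tabs : List (List (String × String))) (url : Option String) (out : Option (List (String × String))) : Prop := out = find_target_tab_alt tabs url
instance (tabs : List (List (String × String))) (url : Option String) (out : Option (List (String × String))) : Decidable (Spec_find_target_tab tabs url out) := by unfold Spec_find_target_tab; infer_instance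

-- ===== CLAIM (what is proved, stated in full; the proofs are below) =====
def Claim_equal_find_target_tab : Prop := ∀ (tabs : List (List (String × String))) (url : Option String), Dom_find_target_tab tabs url → Spec_find_target_tab tabs url (find_target_tab tabs url)

-- ===== LEMMAS AND PROOFS =====

-- The fold's pair accumulator holds A's url-loop result and A's page-loop result.
lemma pvB_foldl_eq (key : Option String) (tabs : List (List (String × String))) :
    ∀ (hit page : Option (List (String × String))),
    List.foldl (pvB_step key) (hit, page) tabs =
      (hit.or (match key with | some k => pvA_urlLoop k tabs | none => none),
       page.or (pvA_pageLoop tabs)) := by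
  induction tabs with
  | nil => intro hit page; cases key <;> simp [pvA_urlLoop, pvA_pageLoop]
  | cons tab rest ih =>
    intro hit page
    simp only [List.foldl_cons, pvB_step, ih, pvA_pageLoop]
    cases key with
    | none =>
      by_cases hpg : ((PySem.Dict.mk tab).get? "type" == some "page") = true <;>
        cases hit <;> cases page <;> simp [hpg, Option.or]
    | some k =>
      simp only [pvA_urlLoop]
      by_cases hm : PySem.Str.isIn k ((PySem.Dict.mk tab).getD "url" "") = true <;>
        rw [PySem.Str.isIn_eq] at hm <;>
        by_cases hpg : ((PySem.Dict.mk tab).get? "type" == some "page") = true <;>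
          cases hit <;> cases page <;> simp [hm, hpg, Option.or]

-- ===== VERDICT (by name: the statement is the Claim_ definition above) =====
theorem find_target_tab_spec : Claim_equal_find_target_tab := by
  intro tabs url _
  unfold Spec_find_target_tab find_target_tab find_target_tab_alt pvB_key
  rw [pvB_foldl_eq]
  cases url with
  | none =>
    cases pvA_pageLoop tabs <;> simp [Option.or]
  | some u =>
    by_cases hu : u = ""
    · simp only [hu, if_pos rfl]
      cases pvA_pageLoop tabs <;> simp [Option.or]
    · simp only [if_neg hu]
      cases pvA_urlLoop (((PySem.Str.split? u "?").getD [u]).headD "") tabs with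
      | some t => simp [Option.or]
      | none => cases hp : pvA_pageLoop tabs <;> simp [Option.or]
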